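-- pv_equiv track=rewrite | github.com/DrkSrvBotMnger/david-workshop | bot/ui/admin/reporting_views.py | _join_and_truncate
-- ===== SOURCE A (Python) =====
-- def _join_and_truncate(items: list[str], sep: str = " , ", max_chars: int = 180) -> str:
--     """Join items with a separator, capping total length, and add a (+N more) suffix if needed."""
--     out, used = [], 0
--     for i, s in enumerate(items):
--         add = (sep if i else "") + s
--         if used + len(add) > max_chars:
--             remaining = len(items) - i
--             if remaining > 0:
--                 out.append(f"{sep}(+{remaining} more)")
--             break
--         out.append(add if i else s)
--         used += len(add)
--     return "".join(out)
-- ===== SOURCE B (Python) =====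
-- def _join_and_truncate(items: list[str], sep: str = " , ", max_chars: int = 180) -> str:
--     """Binary-search the largest fitting prefix over precomputed cumulative join lengths."""
--     pref = [0]
--     cur = 0
--     for i, s in enumerate(items):
--         cur += (len(sep) if i else 0) + len(s)
--         pref.append(cur)
--     lo, hi = 0, len(items)
--     while lo < hi:
--         mid = (lo + hi + 1) // 2
--         if pref[mid] <= max_chars:
--             lo = mid
--         else:
--             hi = mid - 1
--     if lo == len(items):
--         return sep.join(items)
--     return sep.join(items[:lo]) + f"{sep}(+{len(items) - lo} more)"
-- ===== Notes on version B (the rewrite author's own statement) =====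
-- stated objective: alternative
-- what changed: A makes one sequential pass appending pieces to a list and breaking at the first overflow; B first builds a prefix-sum table of cumulative joined lengths and then BINARY-SEARCHES (monotone, since lengths are nonnegative) for the largest fitting prefix, constructing the result with a single sep.join plus an optional '(+N more)' suffix.
import Mathlib
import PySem

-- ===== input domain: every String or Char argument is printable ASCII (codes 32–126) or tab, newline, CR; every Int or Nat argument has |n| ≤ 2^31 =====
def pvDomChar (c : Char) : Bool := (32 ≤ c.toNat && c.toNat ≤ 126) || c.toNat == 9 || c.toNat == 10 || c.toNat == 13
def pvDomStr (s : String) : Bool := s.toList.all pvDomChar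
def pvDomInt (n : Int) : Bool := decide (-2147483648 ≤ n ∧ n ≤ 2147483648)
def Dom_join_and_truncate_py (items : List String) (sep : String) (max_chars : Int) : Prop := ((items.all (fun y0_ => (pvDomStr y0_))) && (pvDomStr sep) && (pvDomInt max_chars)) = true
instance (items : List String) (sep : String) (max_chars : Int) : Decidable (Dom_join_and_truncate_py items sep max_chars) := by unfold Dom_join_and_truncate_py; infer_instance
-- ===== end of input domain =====

-- B replaces A's sequential piece-appending pass by a prefix-sum table of cumulative
-- joined lengths plus a binary search for the largest fitting prefix; objective: alternative.


-- ===== PORT A =====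
-- the for-loop over enumerate(items): i = index, used = running length, out = piece list
def pvLoopA (n : Nat) (sep : String) (max_chars : Int) :
    List String → Nat → Int → List String → List String
  | [], _, _, out => out
  | s :: rest, i, used, out =>
    let add := (if i ≠ 0 then sep else "") ++ s
    if used + PySem.Str.len add > max_chars then
      let remaining : Int := (n : Int) - (i : Int)
      if remaining > 0 then
        out ++ [sep ++ "(+" ++ PySem.Int.toStr remaining ++ " more)"]
      else out
    else
      pvLoopA n sep max_chars rest (i + 1) (used + PySem.Str.len add)
        (out ++ [if i ≠ 0 then add else s])

def join_and_truncate_py (items : List String) (sep : String) (max_chars : Int) : String :=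
  PySem.Str.join "" (pvLoopA items.length sep max_chars items 0 0 [])

-- ===== PORT B =====
-- the prefix-sum loop over enumerate(items): cur = running cumulative length, pref grows by one entry per item
def pvPrefLoop (sep : String) : List String → Nat → Int → List Int → List Int
  | [], _, _, pref => pref
  | s :: rest, i, cur, pref =>
      let cur' := cur + (if i ≠ 0 then PySem.Str.len sep else 0) + PySem.Str.len s
      pvPrefLoop sep rest (i + 1) cur' (pref ++ [cur'])

-- the while-loop binary search; pref[mid] is always in range in Source B, so pyGetD with default 0 is exact,
-- and '(lo + hi + 1) // 2' on the nonnegative lo, hi is exactly Nat division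
def pvBSearch (pref : List Int) (mx : Int) (lo hi : Nat) : Nat :=
  if lo < hi then
    let mid := (lo + hi + 1) / 2
    if PySem.List.pyGetD pref (mid : Int) 0 ≤ mx then pvBSearch pref mx mid hi
    else pvBSearch pref mx lo (mid - 1)
  else lo
termination_by hi - lo
decreasing_by all_goals omega

def join_and_truncate_py_alt (items : List String) (sep : String) (max_chars : Int) : String :=
  -- Source B's locals pref / lo written inline
  if pvBSearch (pvPrefLoop sep items 0 0 [0]) max_chars 0 items.length = items.length then
    PySem.Str.join sep items
  else
    PySem.Str.join sep (items.take (pvBSearch (pvPrefLoop sep items 0 0 [0]) max_chars 0 items.length)) ++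
      (sep ++ "(+" ++ PySem.Int.toStr ((items.length : Int) -
        ((pvBSearch (pvPrefLoop sep items 0 0 [0]) max_chars 0 items.length : Nat) : Int)) ++ " more)")

-- ===== PRECONDITION & SPEC =====
def Spec_join_and_truncate_py (items : List String) (sep : String) (max_chars : Int) (out : String) : Prop := out = join_and_truncate_py_alt items sep max_chars
instance (items : List String) (sep : String) (max_chars : Int) (out : String) : Decidable (Spec_join_and_truncate_py items sep max_chars out) := by unfold Spec_join_and_truncate_py; infer_instance

-- ===== CLAIM (what is proved, stated in full; the proofs are below) =====
def Claim_equal_join_and_truncate_py : Prop := ∀ (items : List String) (sep : String) (max_chars : Int), Dom_join_and_truncate_py items sep max_chars → Spec_join_and_truncate_py items sep max_chars (join_and_truncate_py items sep max_chars)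

-- ===== LEMMAS AND PROOFS =====

-- A's cut point: some c at the first index whose inclusion overflows, none if all fit
def pvCountFit (sep : String) (max_chars : Int) : List String → Nat → Int → Option Nat
  | [], _, _ => none
  | s :: rest, count, total =>
    let total' := total + (if count ≠ 0 then PySem.Str.len sep else 0) + PySem.Str.len s
    if total' > max_chars then some count
    else pvCountFit sep max_chars rest (count + 1) total'

-- cumulative length of the first m entries of rest, the first carrying index i
def pvSumFrom (sep : String) : Nat → List String → Nat → Int
  | _, _, 0 => 0
  | _, [], _ + 1 => 0
  | i, s :: r, m + 1 =>
      (if i ≠ 0 then PySem.Str.len sep else 0) + PySem.Str.len s + pvSumFrom sep (i + 1) r m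

-- tail of a separated join: sep ++ x for each x
def pvTail (sep : String) : List String → String
  | [] => ""
  | x :: r => sep ++ x ++ pvTail sep r

theorem pv_sjoin_nil (sep : String) : PySem.Str.join sep [] = "" := by
  apply String.toList_inj.mp
  simp [PySem.Str.toList_join, PySem.Chars.join_nil]

theorem pv_sjoin_one (sep x : String) : PySem.Str.join sep [x] = x := by
  apply String.toList_inj.mp
  simp [PySem.Str.toList_join, PySem.Chars.join_singleton]

theorem pv_sjoin_cons₂ (sep p q : String) (rest : List String) :
    PySem.Str.join sep (p :: q :: rest) = p ++ sep ++ PySem.Str.join sep (q :: rest) := by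
  apply String.toList_inj.mp
  simp [PySem.Str.toList_join, PySem.Chars.join_cons_cons]

theorem pv_sjoin_cons (sep x : String) (xs : List String) :
    PySem.Str.join sep (x :: xs) = x ++ pvTail sep xs := by
  induction xs generalizing x with
  | nil => simp [pv_sjoin_one, pvTail]
  | cons y r ih =>
      rw [pv_sjoin_cons₂, ih, pvTail, String.append_assoc]
      simp [String.append_assoc]

theorem pv_sjoin_snoc (out : List String) (x : String) :
    PySem.Str.join "" (out ++ [x]) = PySem.Str.join "" out ++ x := by
  induction out with
  | nil => simp [pv_sjoin_nil, pv_sjoin_one]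
  | cons a t ih =>
      cases t with
      | nil => simp [pv_sjoin_one, pv_sjoin_cons₂]
      | cons b t' =>
          have h1 : PySem.Str.join "" (a :: (b :: t' ++ [x])) =
              a ++ "" ++ PySem.Str.join "" (b :: t' ++ [x]) := by
            have := pv_sjoin_cons₂ "" a b (t' ++ [x]); simpa using this
          simp only [List.cons_append] at *
          rw [h1, ih, pv_sjoin_cons₂]
          simp [String.append_assoc]

theorem pv_countFit_le (sep : String) (mx : Int) :
    ∀ (rest : List String) (i : Nat) (used : Int) (c : Nat),
      pvCountFit sep mx rest i used = some c → i ≤ c := by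
  intro rest
  induction rest with
  | nil => intro i used c h; simp [pvCountFit] at h
  | cons s r ih =>
      intro i used c h
      simp only [pvCountFit] at h
      split at h <;> split at h <;>
        first
          | (simp only [Option.some.injEq] at h; omega)
          | (have := ih (i + 1) _ c h; omega)

-- the A-loop correspondence, for i ≥ 1 (every remaining item is sep-prefixed)
theorem pv_loop_eq (sep : String) (mx : Int) (n : Nat) :
    ∀ (rest : List String) (i : Nat) (used : Int) (out : List String),
      1 ≤ i → i + rest.length = n →
      PySem.Str.join "" (pvLoopA n sep mx rest i used out) =
        PySem.Str.join "" out ++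
          (match pvCountFit sep mx rest i used with
           | none => pvTail sep rest
           | some c =>
               pvTail sep (rest.take (c - i)) ++
                 (sep ++ "(+" ++ PySem.Int.toStr ((n : Int) - (c : Int)) ++ " more)")) := by
  intro rest
  induction rest with
  | nil =>
      intro i used out _ _
      simp [pvLoopA, pvCountFit, pvTail]
  | cons s r ih =>
      intro i used out hi hn
      have hine : i ≠ 0 := by omega
      simp only [pvLoopA, pvCountFit, hine, ne_eq, not_false_iff, if_pos]
      rw [PySem.Str.len_append]
      by_cases hc : used + (PySem.Str.len sep + PySem.Str.len s) > mx
      · have hc' : used + PySem.Str.len sep + PySem.Str.len s > mx := by omega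
        have hrem : ((n : Int) - (i : Int)) > 0 := by
          have : i < n := by simp at hn; omega
          omega
        rw [if_pos hc, if_pos hrem, if_pos hc']
        rw [pv_sjoin_snoc]
        simp [pvTail, String.append_assoc]
      · have hc' : ¬ (used + PySem.Str.len sep + PySem.Str.len s > mx) := by omega
        rw [if_neg hc, if_neg hc']
        have harg : used + PySem.Str.len sep + PySem.Str.len s =
            used + (PySem.Str.len sep + PySem.Str.len s) := by ring
        rw [harg] at *
        have hn' : (i + 1) + r.length = n := by simp at hn ⊢; omega
        rw [ih (i + 1) (used + (PySem.Str.len sep + PySem.Str.len s)) (out ++ [sep ++ s]) (by omega) hn']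
        rw [pv_sjoin_snoc, String.append_assoc]
        congr 1
        cases hcf : pvCountFit sep mx r (i + 1) (used + (PySem.Str.len sep + PySem.Str.len s)) with
        | none => simp [pvTail, String.append_assoc]
        | some c =>
            have hge : i + 1 ≤ c := pv_countFit_le sep mx r (i + 1) _ c hcf
            have htake : (s :: r).take (c - i) = s :: r.take (c - (i + 1)) := by
              have : c - i = (c - (i + 1)) + 1 := by omega
              rw [this, List.take_succ_cons]
            simp only [htake, pvTail, String.append_assoc]

-- A's value as a function of its cut point
theorem pvA_eq (items : List String) (sep : String) (mx : Int) :
    join_and_truncate_py items sep mx =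
      match pvCountFit sep mx items 0 0 with
      | none => PySem.Str.join sep items
      | some c =>
          PySem.Str.join sep (items.take c) ++
            (sep ++ "(+" ++ PySem.Int.toStr ((items.length : Int) - (c : Int)) ++ " more)") := by
  unfold join_and_truncate_py
  cases items with
  | nil => simp [pvLoopA, pvCountFit, pv_sjoin_nil]
  | cons s rest =>
      simp only [pvLoopA, pvCountFit]
      norm_num
      by_cases hc : mx < (s.length : Int)
      · rw [if_pos hc, if_pos hc]
        simp [pv_sjoin_one, pv_sjoin_nil]
      · rw [if_neg hc, if_neg hc,
            pv_loop_eq sep mx (rest.length + 1) rest 1 _ [s] le_rfl (by omega),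
            pv_sjoin_one]
        cases hcf : pvCountFit sep mx rest 1 ((s.length : Int)) with
        | none => simp [pv_sjoin_cons]
        | some c =>
            have hge : 1 ≤ c := pv_countFit_le sep mx rest 1 _ c hcf
            have htake : (s :: rest).take c = s :: rest.take (c - 1) := by
              obtain ⟨c', rfl⟩ : ∃ c', c = c' + 1 := ⟨c - 1, by omega⟩
              simp
            push_cast
            simp [htake, pv_sjoin_cons, String.append_assoc]

-- ---- B side: prefix sums, monotonicity, binary search ----

theorem pv_len_nonneg (s : String) : 0 ≤ PySem.Str.len s := by simp [PySem.Str.len_eq]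

theorem pv_sumFrom_nonneg (sep : String) :
    ∀ (r : List String) (i m : Nat), 0 ≤ pvSumFrom sep i r m := by
  intro r
  induction r with
  | nil => intro i m; cases m <;> simp [pvSumFrom]
  | cons s t ih =>
      intro i m
      cases m with
      | zero => simp [pvSumFrom]
      | succ m' =>
          have h1 := pv_len_nonneg sep
          have h2 := pv_len_nonneg s
          have h3 := ih (i + 1) m'
          simp only [pvSumFrom]
          split <;> omega

theorem pv_sumFrom_step (sep : String) :
    ∀ (r : List String) (i m : Nat), pvSumFrom sep i r m ≤ pvSumFrom sep i r (m + 1) := by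
  intro r
  induction r with
  | nil => intro i m; cases m <;> simp [pvSumFrom]
  | cons s t ih =>
      intro i m
      cases m with
      | zero =>
          have h1 := pv_len_nonneg sep
          have h2 := pv_len_nonneg s
          have h3 := pv_sumFrom_nonneg sep t (i + 1) 0
          simp only [pvSumFrom]
          split <;> omega
      | succ m' =>
          have := ih (i + 1) m'
          simp only [pvSumFrom]
          omega

theorem pv_sumFrom_mono (sep : String) (r : List String) (i : Nat) {m m' : Nat}
    (h : m ≤ m') : pvSumFrom sep i r m ≤ pvSumFrom sep i r m' := by
  induction m', h using Nat.le_induction with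
  | base => exact le_rfl
  | succ k hk ih => exact le_trans ih (pv_sumFrom_step sep r i k)

-- the prefix loop builds exactly the cumulative sums appended to its accumulator
theorem pv_prefLoop_eq (sep : String) :
    ∀ (rest : List String) (i : Nat) (cur : Int) (pref : List Int),
      pvPrefLoop sep rest i cur pref =
        pref ++ (List.range rest.length).map (fun m => cur + pvSumFrom sep i rest (m + 1)) := by
  intro rest
  induction rest with
  | nil => intro i cur pref; simp [pvPrefLoop]
  | cons s r ih =>
      intro i cur pref
      simp only [pvPrefLoop]
      rw [ih]
      rw [List.append_assoc]
      congr 1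
      rw [List.length_cons, List.range_succ_eq_map]
      simp only [List.map_cons, List.map_map, List.singleton_append]
      congr 1
      · simp [pvSumFrom]; ring
      · apply List.map_congr_left
        intro m _
        simp only [Function.comp_apply, pvSumFrom]
        ring

-- entry k of the prefix table (k ≤ n) is the cumulative length of the first k items
theorem pv_pref_getD (sep : String) (items : List String) (k : Nat) (hk : k ≤ items.length) :
    (pvPrefLoop sep items 0 0 [0]).getD k 0 = pvSumFrom sep 0 items k := by
  rw [pv_prefLoop_eq]
  cases k with
  | zero => simp [pvSumFrom]
  | succ m =>
      have hm : m < items.length := by omega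
      have : ([(0 : Int)] ++ (List.range items.length).map
          (fun m => 0 + pvSumFrom sep 0 items (m + 1))).getD (m + 1) 0 =
          ((List.range items.length).map (fun m => 0 + pvSumFrom sep 0 items (m + 1))).getD m 0 := by
        simp [List.getD]
      rw [this, PySem.List.getD_map_range _ _ _ _ hm]
      omega

-- the binary search returns ans whenever 'pref[k] ≤ mx ↔ k ≤ ans' holds on [1, n]
theorem pv_bsearch_eq (pref : List Int) (mx : Int) (ans n : Nat)
    (hdef : ∀ k, 1 ≤ k → k ≤ n → (PySem.List.pyGetD pref (k : Int) 0 ≤ mx ↔ k ≤ ans)) :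
    ∀ (d lo hi : Nat), hi - lo ≤ d → lo ≤ ans → ans ≤ hi → hi ≤ n →
      pvBSearch pref mx lo hi = ans := by
  intro d
  induction d with
  | zero =>
      intro lo hi hd h1 h2 _
      rw [pvBSearch]
      rw [if_neg (by omega)]
      omega
  | succ d ih =>
      intro lo hi hd h1 h2 hn
      rw [pvBSearch]
      by_cases hlt : lo < hi
      · rw [if_pos hlt]
        have hmid1 : lo < (lo + hi + 1) / 2 := by omega
        have hmid2 : (lo + hi + 1) / 2 ≤ hi := by omega
        by_cases hle : PySem.List.pyGetD pref (((lo + hi + 1) / 2 : Nat) : Int) 0 ≤ mx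
        · rw [if_pos hle]
          have hans : (lo + hi + 1) / 2 ≤ ans :=
            (hdef _ (by omega) (by omega)).mp hle
          exact ih _ _ (by omega) hans h2 hn
        · rw [if_neg hle]
          have hans : ¬ ((lo + hi + 1) / 2 ≤ ans) := fun h =>
            hle ((hdef _ (by omega) (by omega)).mpr h)
          exact ih _ _ (by omega) h1 (by omega) (by omega)
      · rw [if_neg hlt]; omega

-- characterization of A's cut point: first overflow, all earlier prefixes fit
theorem pv_countFit_some_spec (sep : String) (mx : Int) :
    ∀ (rest : List String) (i : Nat) (used : Int) (c : Nat),
      pvCountFit sep mx rest i used = some c →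
        i ≤ c ∧ c - i < rest.length ∧
        mx < used + pvSumFrom sep i rest (c - i + 1) ∧
        ∀ m, 1 ≤ m → m ≤ c - i → used + pvSumFrom sep i rest m ≤ mx := by
  intro rest
  induction rest with
  | nil => intro i used c h; simp [pvCountFit] at h
  | cons s r ih =>
      intro i used c h
      simp only [pvCountFit] at h
      by_cases hov : used + (if i ≠ 0 then PySem.Str.len sep else 0) + PySem.Str.len s > mx
      · rw [if_pos hov] at h
        simp only [Option.some.injEq] at h
        subst h
        refine ⟨le_refl i, by simp, ?_, by omega⟩
        simp only [Nat.sub_self, pvSumFrom]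
        omega
      · rw [if_neg hov] at h
        obtain ⟨hc1, hc2, hc3, hc4⟩ := ih (i + 1) _ c h
        have hci : 1 ≤ c - i := by omega
        refine ⟨by omega, by simp; omega, ?_, ?_⟩
        · have he : c - i + 1 = (c - i - 1 + 1) + 1 := by omega
          rw [he]
          simp only [pvSumFrom]
          have : c - (i + 1) + 1 = c - i - 1 + 1 := by omega
          rw [this] at hc3
          omega
        · intro m hm1 hm2
          cases m with
          | zero => omega
          | succ m' =>
              simp only [pvSumFrom]
              cases Nat.eq_zero_or_pos m' with
              | inl h0 => subst h0; simp only [pvSumFrom]; omega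
              | inr hpos =>
                  have := hc4 m' hpos (by omega)
                  omega

theorem pv_countFit_none_spec (sep : String) (mx : Int) :
    ∀ (rest : List String) (i : Nat) (used : Int),
      pvCountFit sep mx rest i used = none →
        ∀ m, 1 ≤ m → m ≤ rest.length → used + pvSumFrom sep i rest m ≤ mx := by
  intro rest
  induction rest with
  | nil => intro i used _ m hm1 hm2; simp only [List.length_nil] at hm2; omega
  | cons s r ih =>
      intro i used h m hm1 hm2
      simp only [pvCountFit] at h
      by_cases hov : used + (if i ≠ 0 then PySem.Str.len sep else 0) + PySem.Str.len s > mx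
      · rw [if_pos hov] at h; exact absurd h (by simp)
      · rw [if_neg hov] at h
        cases m with
        | zero => omega
        | succ m' =>
            simp only [pvSumFrom]
            cases Nat.eq_zero_or_pos m' with
            | inl h0 => subst h0; simp only [pvSumFrom]; omega
            | inr hpos =>
                have := ih (i + 1) _ h m' hpos (by simpa using hm2)
                omega

-- B's value as a function of A's cut point
theorem pvB_eq (items : List String) (sep : String) (mx : Int) :
    join_and_truncate_py_alt items sep mx =
      match pvCountFit sep mx items 0 0 with
      | none => PySem.Str.join sep items
      | some c =>
          PySem.Str.join sep (items.take c) ++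
            (sep ++ "(+" ++ PySem.Int.toStr ((items.length : Int) - (c : Int)) ++ " more)") := by
  unfold join_and_truncate_py_alt
  have hget : ∀ k : Nat, k ≤ items.length →
      PySem.List.pyGetD (pvPrefLoop sep items 0 0 [0]) (k : Int) 0 = pvSumFrom sep 0 items k := by
    intro k hk
    rw [PySem.List.pyGetD_natCast]
    exact pv_pref_getD sep items k hk
  cases hcf : pvCountFit sep mx items 0 0 with
  | none =>
      have hdef : ∀ k, 1 ≤ k → k ≤ items.length →
          (PySem.List.pyGetD (pvPrefLoop sep items 0 0 [0]) (k : Int) 0 ≤ mx ↔ k ≤ items.length) := by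
        intro k hk1 hk2
        rw [hget k hk2]
        have := pv_countFit_none_spec sep mx items 0 0 hcf k hk1 hk2
        constructor
        · intro _; exact hk2
        · intro _; omega
      rw [pv_bsearch_eq _ mx items.length items.length hdef items.length 0 items.length
          (by omega) (by omega) le_rfl le_rfl]
      simp
  | some c =>
      obtain ⟨_, hc2, hc3, hc4⟩ := pv_countFit_some_spec sep mx items 0 0 c hcf
      simp only [Nat.sub_zero] at hc2 hc3 hc4
      have hdef : ∀ k, 1 ≤ k → k ≤ items.length →
          (PySem.List.pyGetD (pvPrefLoop sep items 0 0 [0]) (k : Int) 0 ≤ mx ↔ k ≤ c) := by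
        intro k hk1 hk2
        rw [hget k hk2]
        constructor
        · intro hle
          by_contra hgt
          have hmono : pvSumFrom sep 0 items (c + 1) ≤ pvSumFrom sep 0 items k :=
            pv_sumFrom_mono sep items 0 (by omega)
          omega
        · intro hle
          have := hc4 k hk1 hle
          omega
      rw [pv_bsearch_eq _ mx c items.length hdef items.length 0 items.length
          (by omega) (by omega) (by omega) le_rfl]
      rw [if_neg (by omega)]

-- ===== VERDICT (by name: the statement is the Claim_ definition above) =====
theorem join_and_truncate_py_spec : Claim_equal_join_and_truncate_py := by
  intro items sep mx _
  unfold Spec_join_and_truncate_py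
  rw [pvA_eq, pvB_eq]
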